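-- pv_equiv track=rewrite | github.com/HiMemX/DynamicGeometry | Helpers/ImageTools.py | getbiggestsize
-- ===== SOURCE A (Python) =====
-- def getbiggestsize(textures):
--     biggestsizex = 0
--     biggestsizey = 0
--     for texture in textures:
--         if len(texture) > biggestsizey:
--             biggestsizey = len(texture)
--
--         if len(texture[0]) > biggestsizex:
--             biggestsizex = len(texture[0])
--
--     return biggestsizex, biggestsizey
-- ===== SOURCE B (Python) =====
-- def getbiggestsize(textures):
--     ys = sorted((len(t) for t in textures), reverse=True)
--     xs = sorted((len(t[0]) for t in textures), reverse=True)
--     return (xs[0] if xs else 0, ys[0] if ys else 0)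
-- ===== Notes on version B (the rewrite author's own statement) =====
-- stated objective: alternative
-- what changed: Replaces the running-max loop with two descending sorts of the length lists, returning the first element of each sorted list (0 when empty): sort-then-pick instead of a max scan.
import Mathlib
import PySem

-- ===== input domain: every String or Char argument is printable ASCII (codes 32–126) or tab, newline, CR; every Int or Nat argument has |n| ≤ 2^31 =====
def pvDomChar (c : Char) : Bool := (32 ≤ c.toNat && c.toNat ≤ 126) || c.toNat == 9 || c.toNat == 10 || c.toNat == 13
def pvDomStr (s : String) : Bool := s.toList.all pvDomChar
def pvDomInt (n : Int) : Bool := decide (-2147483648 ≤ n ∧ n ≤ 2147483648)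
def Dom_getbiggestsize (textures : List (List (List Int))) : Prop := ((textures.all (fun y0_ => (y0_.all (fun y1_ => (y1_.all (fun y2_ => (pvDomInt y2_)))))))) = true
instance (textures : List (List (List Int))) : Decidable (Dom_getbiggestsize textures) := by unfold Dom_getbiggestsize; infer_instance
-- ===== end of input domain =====

-- B finds each maximum by sorting the length lists in descending order and taking the first element, instead of A's running-max loop.


-- ===== PORT A =====
-- one loop, two accumulators; texture[0] ported via headD [] (exact on Pre_, where every texture is nonempty)
def getbiggestsize (textures : List (List (List Int))) : Int × Int :=
  let st := textures.foldl
    (fun (acc : Int × Int) texture =>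
      let by' := if (texture.length : Int) > acc.2 then (texture.length : Int) else acc.2
      let bx' := if ((texture.headD []).length : Int) > acc.1 then ((texture.headD []).length : Int) else acc.1
      (bx', by'))
    (0, 0)
  st

-- ===== PORT B =====
-- sort each length list descending, take the first element (0 for the empty list); 'l[0] if l else 0' is headD 0
def getbiggestsize_alt (textures : List (List (List Int))) : Int × Int :=
  let ys := PySem.List.sorted (textures.map (fun t => (t.length : Int))) (fun x => x) true
  let xs := PySem.List.sorted (textures.map (fun t => ((t.headD []).length : Int))) (fun x => x) true
  (xs.headD 0, ys.headD 0)

-- ===== PRECONDITION & SPEC =====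
-- Pre_ excludes inputs containing an empty texture: there Python A (and Python B) raise IndexError on texture[0].
def Pre_getbiggestsize (textures : List (List (List Int))) : Prop :=
  ∀ t ∈ textures, t ≠ []
instance (textures : List (List (List Int))) : Decidable (Pre_getbiggestsize textures) := by unfold Pre_getbiggestsize; infer_instance
def pvWitness_getbiggestsize : List (List (List Int)) := [[[1, 2], [3]], [[4]]]

def Spec_getbiggestsize (textures : List (List (List Int))) (out : Int × Int) : Prop := out = getbiggestsize_alt textures
instance (textures : List (List (List Int))) (out : Int × Int) : Decidable (Spec_getbiggestsize textures out) := by unfold Spec_getbiggestsize; infer_instance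

-- ===== CLAIM (what is proved, stated in full; the proofs are below) =====
def Claim_equal_getbiggestsize : Prop := ∀ (textures : List (List (List Int))), Dom_getbiggestsize textures → Pre_getbiggestsize textures → Spec_getbiggestsize textures (getbiggestsize textures)

-- ===== LEMMAS AND PROOFS =====
-- A's fused loop computes the two running maxima
lemma getbiggestsize_fold_eq (ts : List (List (List Int))) : ∀ (bx by' : Int),
    ts.foldl
      (fun (acc : Int × Int) texture =>
        let b2 := if (texture.length : Int) > acc.2 then (texture.length : Int) else acc.2
        let b1 := if ((texture.headD []).length : Int) > acc.1 then ((texture.headD []).length : Int) else acc.1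
        (b1, b2))
      (bx, by')
    = ((ts.map (fun t => ((t.headD []).length : Int))).foldl max bx,
       (ts.map (fun t => (t.length : Int))).foldl max by') := by
  induction ts with
  | nil => intro bx by'; simp
  | cons t ts ih =>
    intro bx by'
    simp only [List.foldl_cons, List.map_cons]
    rw [ih]
    congr 1 <;> · congr 1; split <;> omega

-- head of the descending sort of a nonnegative list is its running max from 0
lemma headD_sorted_rev_eq_foldl_max (l : List Int) (hnn : ∀ y ∈ l, 0 ≤ y) :
    (PySem.List.sorted l (fun x => x) true).headD 0 = l.foldl max 0 := by
  cases h : PySem.List.sorted l (fun x => x) true with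
  | nil =>
    rw [PySem.List.sorted_eq_nil_iff] at h
    simp [h]
  | cons m t =>
    have hm : m ∈ l := by
      have : m ∈ PySem.List.sorted l (fun x => x) true := by rw [h]; exact List.mem_cons_self
      rwa [PySem.List.mem_sorted] at this
    have hge : ∀ y ∈ l, y ≤ m := PySem.List.key_head_sorted_rev_ge l (fun x => x) h
    have h1 : m ≤ l.foldl max 0 := (PySem.List.le_foldl_max l 0).2 m hm
    have h2 : l.foldl max 0 ≤ m := by
      rcases PySem.List.foldl_max_mem l 0 with h0 | hmem
      · rw [h0]; exact hnn m hm
      · exact hge _ hmem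
    simp [le_antisymm h1 h2]

-- ===== VERDICT (by name: the statement is the Claim_ definition above) =====
theorem getbiggestsize_spec : Claim_equal_getbiggestsize := by
  intro textures _ _
  unfold Spec_getbiggestsize getbiggestsize getbiggestsize_alt
  simp only []
  rw [getbiggestsize_fold_eq textures 0 0,
      headD_sorted_rev_eq_foldl_max _ (by intro y hy; simp at hy; obtain ⟨t, _, rfl⟩ := hy; positivity),
      headD_sorted_rev_eq_foldl_max _ (by intro y hy; simp at hy; obtain ⟨t, _, rfl⟩ := hy; positivity)]
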